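-- pv_equiv track=rewrite | github.com/PrithwishJana/CoTran | transpilers/TSS_CodeConv_PyTranslations/1644/GFG.py | solve
-- ===== SOURCE A (Python) =====
-- def solve(X, Y, N, K):
--     count = [0 for _ in range(N + 1)]
--     sol = 0
--     count [0] = 0
--     for i in range(1, N + 1):
--         count [i] = count [i - 1] + abs(X[i - 1] - Y[i - 1])
--     j = 0
--     for i in range(1, N + 1):
--         while (count [i] - count [j]) > K:
--             j += 1
--         sol = max(sol, i - j)
--     return sol
-- ===== SOURCE B (Python) =====
-- def solve(X, Y, N, K):
--     sol = 0
--     cur = 0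
--     j = 0
--     for i in range(N):
--         cur += abs(X[i] - Y[i])
--         while cur > K:
--             cur -= abs(X[j] - Y[j])
--             j += 1
--         sol = max(sol, i - j + 1)
--     return sol
-- ===== Notes on version B (the rewrite author's own statement) =====
-- stated objective: simpler
-- what changed: Replaced the O(N)-extra-space prefix-sum array and its two separate loops by a single-pass sliding window that maintains the window's sum of |X[i]-Y[i]| incrementally.
import Mathlib
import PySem

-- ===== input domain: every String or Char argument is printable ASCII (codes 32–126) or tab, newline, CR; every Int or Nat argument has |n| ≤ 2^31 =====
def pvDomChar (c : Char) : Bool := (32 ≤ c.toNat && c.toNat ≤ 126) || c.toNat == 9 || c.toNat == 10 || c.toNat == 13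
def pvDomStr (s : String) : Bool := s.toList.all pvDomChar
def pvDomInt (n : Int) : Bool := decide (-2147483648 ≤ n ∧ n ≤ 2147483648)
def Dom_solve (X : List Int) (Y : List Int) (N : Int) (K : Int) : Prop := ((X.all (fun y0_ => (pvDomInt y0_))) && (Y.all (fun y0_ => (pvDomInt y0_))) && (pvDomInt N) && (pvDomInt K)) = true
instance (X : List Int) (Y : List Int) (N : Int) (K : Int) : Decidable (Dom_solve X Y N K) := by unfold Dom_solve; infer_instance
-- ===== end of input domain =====

-- B replaces A's prefix-sum array and its two loops by a one-pass sliding window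
-- with a running window sum (simpler: O(1) extra space, one fused loop).

-- ===== PORT A =====
-- 'while (count[i] - count[j]) > K: j += 1'; Python's j starts at 0 and only
-- increments, so it is kept as a Nat; the recursion stops where Python's
-- count[j] would raise IndexError (pyGet? = none; unreachable under Pre_).
def solveWhileA (count : List Int) (K ci : Int) (j : Nat) : Nat :=
  match h : PySem.List.pyGet? count (j : Int) with
  | none => j
  | some cj => if ci - cj > K then solveWhileA count K ci (j + 1) else j
termination_by count.length - j
decreasing_by
  have hj : j < count.length := by
    by_contra hge
    rw [PySem.List.pyGet?_natCast] at h
    simp [List.getElem?_eq_none (by omega : count.length ≤ j)] at h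
  omega

-- the first loop of A: count[0]=0; for i in range(1,N+1): count[i]=count[i-1]+abs(X[i-1]-Y[i-1])
def solveCount (X : List Int) (Y : List Int) (N : Int) : List Int :=
  let c0 := PySem.List.pySetD ((PySem.List.pyRange 0 (N + 1) 1).map (fun _ => (0 : Int))) 0 0
  (PySem.List.pyRange 1 (N + 1) 1).foldl
    (fun c i => PySem.List.pySetD c i
      (PySem.List.pyGetD c (i - 1) 0 +
        |PySem.List.pyGetD X (i - 1) 0 - PySem.List.pyGetD Y (i - 1) 0|)) c0

def solve (X : List Int) (Y : List Int) (N : Int) (K : Int) : Int :=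
  let count := solveCount X Y N
  ((PySem.List.pyRange 1 (N + 1) 1).foldl
    (fun (s : Nat × Int) i =>
      let j := solveWhileA count K (PySem.List.pyGetD count i 0) s.1
      (j, max s.2 (i - (j : Int)))) (0, 0)).2

-- ===== PORT B =====
-- 'while cur > K: cur -= abs(X[j]-Y[j]); j += 1'; j starts at 0 and only
-- increments (Nat); stops where Python's X[j]/Y[j] would raise (unreachable under Pre_).
def solveWhileB (X : List Int) (Y : List Int) (K cur : Int) (j : Nat) : Int × Nat :=
  if cur > K then
    match h : PySem.List.pyGet? X (j : Int), PySem.List.pyGet? Y (j : Int) with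
    | some xj, some yj => solveWhileB X Y K (cur - |xj - yj|) (j + 1)
    | _, _ => (cur, j)
  else (cur, j)
termination_by X.length - j
decreasing_by
  have hj : j < X.length := by
    by_contra hge
    rw [PySem.List.pyGet?_natCast] at h
    simp [List.getElem?_eq_none (by omega : X.length ≤ j)] at h
  omega

def solve_alt (X : List Int) (Y : List Int) (N : Int) (K : Int) : Int :=
  ((PySem.List.pyRange 0 N 1).foldl
    (fun (s : Int × Int × Nat) i =>
      let cur := s.2.1 + |PySem.List.pyGetD X i 0 - PySem.List.pyGetD Y i 0|
      let p := solveWhileB X Y K cur s.2.2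
      (max s.1 (i - (p.2 : Int) + 1), p.1, p.2)) (0, 0, 0)).1

-- ===== PRECONDITION & SPEC =====
-- Pre_ excludes exactly the inputs on which the Python A raises IndexError:
-- N < 0 (count[0]=0 on an empty list), N > len(X) or N > len(Y) (reading X[i-1]),
-- and K < 0 with N ≥ 1 (the while loop runs j past the end of count).
def Pre_solve (X : List Int) (Y : List Int) (N : Int) (K : Int) : Prop :=
  0 ≤ N ∧ N ≤ X.length ∧ N ≤ Y.length ∧ (0 ≤ K ∨ N = 0)
instance (X : List Int) (Y : List Int) (N : Int) (K : Int) : Decidable (Pre_solve X Y N K) := by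
  unfold Pre_solve; infer_instance

def pvWitness_solve : List Int × List Int × Int × Int := ([1, 2, 3], [0, 0, 0], 3, 3)

def Spec_solve (X : List Int) (Y : List Int) (N : Int) (K : Int) (out : Int) : Prop := out = solve_alt X Y N K
instance (X : List Int) (Y : List Int) (N : Int) (K : Int) (out : Int) : Decidable (Spec_solve X Y N K out) := by unfold Spec_solve; infer_instance

-- ===== CLAIM (what is proved, stated in full; the proofs are below) =====
def Claim_equal_solve : Prop := ∀ (X : List Int) (Y : List Int) (N : Int) (K : Int), Dom_solve X Y N K → Pre_solve X Y N K → Spec_solve X Y N K (solve X Y N K)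

-- ===== LEMMAS AND PROOFS =====

-- prefix sums of |X[k]-Y[k]| (the mathematical content of A's count array)
def pref (X : List Int) (Y : List Int) : Nat → Int
  | 0 => 0
  | k + 1 => pref X Y k + |X.getD k 0 - Y.getD k 0|

theorem count_partial (X Y : List Int) (N : Int) (h0 : 0 ≤ N) (m : Nat) (hm : (m : Int) ≤ N) :
    let c0 := PySem.List.pySetD ((PySem.List.pyRange 0 (N + 1) 1).map (fun _ => (0 : Int))) 0 0
    let c := (PySem.List.pyRange 1 ((m : Int) + 1) 1).foldl
      (fun c i => PySem.List.pySetD c i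
        (PySem.List.pyGetD c (i - 1) 0 +
          |PySem.List.pyGetD X (i - 1) 0 - PySem.List.pyGetD Y (i - 1) 0|)) c0
    c.length = N.toNat + 1 ∧ ∀ k : Nat, k ≤ m → c.getD k 0 = pref X Y k := by
  intro c0
  have hc0len : c0.length = N.toNat + 1 := by
    simp [c0, PySem.List.length_pySetD, PySem.List.length_pyRange_one]
    omega
  induction m with
  | zero =>
      simp only [Nat.cast_zero, zero_add, PySem.List.pyRange_one_eq_nil le_rfl, List.foldl_nil]
      refine ⟨hc0len, ?_⟩
      intro k hk
      interval_cases k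
      simp [c0, pref, PySem.List.pySetD_of_nonneg, List.getD_eq_getElem?_getD]
  | succ m ih =>
      have hm' : (m : Int) ≤ N := by push_cast at hm ⊢; omega
      obtain ⟨hlen, hval⟩ := ih hm'
      have hsplit : PySem.List.pyRange 1 ((↑(m + 1) : Int) + 1) 1
          = PySem.List.pyRange 1 ((m : Int) + 1) 1 ++ [(m : Int) + 1] := by
        push_cast
        exact PySem.List.pyRange_one_succ_right (by omega)
      rw [hsplit, List.foldl_append]
      set c := (PySem.List.pyRange 1 ((m : Int) + 1) 1).foldl
        (fun c i => PySem.List.pySetD c i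
          (PySem.List.pyGetD c (i - 1) 0 +
            |PySem.List.pyGetD X (i - 1) 0 - PySem.List.pyGetD Y (i - 1) 0|)) c0 with hc
      simp only [List.foldl_cons, List.foldl_nil]
      have hstep : ((m : Int) + 1) - 1 = (m : Int) := by ring
      rw [hstep]
      have hcast : ((m : Int) + 1) = ((m + 1 : Nat) : Int) := by push_cast; ring
      rw [hcast, PySem.List.pySetD_natCast]
      have hmlt : m + 1 < c.length := by omega
      constructor
      · simpa using hlen
      · intro k hk
        have hgetm : PySem.List.pyGetD c (m : Int) 0 = pref X Y m := by
          rw [PySem.List.pyGetD_natCast]; exact hval m le_rfl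
        by_cases hke : k = m + 1
        · subst hke
          rw [List.getD_eq_getElem?_getD, List.getElem?_set_self hmlt]
          simp [pref, hgetm, PySem.List.pyGetD_natCast, List.getD]
        · have hkm : k ≤ m := by omega
          rw [List.getD_eq_getElem?_getD, List.getElem?_set_ne (by omega)]
          rw [← List.getD_eq_getElem?_getD]
          exact hval k hkm


theorem count_spec (X Y : List Int) (N : Int) (h0 : 0 ≤ N) (k : Nat) (hk : (k : Int) ≤ N) :
    PySem.List.pyGet? (solveCount X Y N) (k : Int) = some (pref X Y k) := by
  unfold solveCount
  have hN : ((N.toNat : Nat) : Int) = N := Int.toNat_of_nonneg h0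
  obtain ⟨hlen, hval⟩ := count_partial X Y N h0 N.toNat (by omega)
  have hr : PySem.List.pyRange 1 (N + 1) 1 = PySem.List.pyRange 1 ((N.toNat : Int) + 1) 1 := by
    rw [hN]
  simp only [hr]
  have hk' : k ≤ N.toNat := by omega
  have hklt : k < _ := lt_of_le_of_lt hk' (by omega : N.toNat < N.toNat + 1)
  rw [PySem.List.pyGet?_natCast, List.getElem?_eq_getElem (by rw [hlen]; omega)]
  have := hval k hk'
  rw [List.getD_eq_getElem?_getD, List.getElem?_eq_getElem (by rw [hlen]; omega)] at this
  simp at this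
  simp [this]


theorem whileA_step (count : List Int) (K ci : Int) (j : Nat) (cj : Int)
    (h : PySem.List.pyGet? count (j : Int) = some cj) :
    solveWhileA count K ci j = if ci - cj > K then solveWhileA count K ci (j + 1) else j := by
  conv_lhs => rw [solveWhileA.eq_def]
  split
  · rename_i hn; rw [hn] at h; cases h
  · rename_i cj' hcj; rw [hcj] at h; cases h; rfl

theorem whileB_step (X Y : List Int) (K cur : Int) (j : Nat) (xj yj : Int)
    (hx : PySem.List.pyGet? X (j : Int) = some xj) (hy : PySem.List.pyGet? Y (j : Int) = some yj) :
    solveWhileB X Y K cur j =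
      if cur > K then solveWhileB X Y K (cur - |xj - yj|) (j + 1) else (cur, j) := by
  conv_lhs => rw [solveWhileB.eq_def]
  by_cases hc : cur > K
  · rw [if_pos hc, if_pos hc]
    split
    · rename_i hx' hy'; rw [hx'] at hx; rw [hy'] at hy; cases hx; cases hy; rfl
    · rename_i hne; exfalso; exact hne _ _ hx hy
  · rw [if_neg hc, if_neg hc]

theorem whileB_stop (X Y : List Int) (K cur : Int) (j : Nat) (h : ¬ cur > K) :
    solveWhileB X Y K cur j = (cur, j) := by
  rw [solveWhileB.eq_def, if_neg h]


theorem while_eq (X Y : List Int) (N K : Int) (hK : 0 ≤ K) (h0 : 0 ≤ N)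
    (hNX : N ≤ X.length) (hNY : N ≤ Y.length)
    (i j : Nat) (hj : j ≤ i) (hi : (i : Int) ≤ N) :
    j ≤ solveWhileA (solveCount X Y N) K (pref X Y i) j ∧
    solveWhileA (solveCount X Y N) K (pref X Y i) j ≤ i ∧
    solveWhileB X Y K (pref X Y i - pref X Y j) j =
      (pref X Y i - pref X Y (solveWhileA (solveCount X Y N) K (pref X Y i) j),
       solveWhileA (solveCount X Y N) K (pref X Y i) j) := by
  suffices H : ∀ d (j : Nat), j ≤ i → i - j ≤ d →
      j ≤ solveWhileA (solveCount X Y N) K (pref X Y i) j ∧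
      solveWhileA (solveCount X Y N) K (pref X Y i) j ≤ i ∧
      solveWhileB X Y K (pref X Y i - pref X Y j) j =
        (pref X Y i - pref X Y (solveWhileA (solveCount X Y N) K (pref X Y i) j),
         solveWhileA (solveCount X Y N) K (pref X Y i) j) by
    exact H (i - j) j hj le_rfl
  intro d
  induction d with
  | zero =>
    intro j hj hd
    have hji : j = i := by omega
    subst hji
    have hA : solveWhileA (solveCount X Y N) K (pref X Y j) j = j := by
      rw [whileA_step _ _ _ _ _ (count_spec X Y N h0 j hi), if_neg (by omega)]
    refine ⟨le_of_eq hA.symm, le_of_eq hA, ?_⟩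
    rw [hA, whileB_stop X Y K _ j (by omega)]
  | succ d ih =>
    intro j hj hd
    by_cases hgt : pref X Y i - pref X Y j > K
    · have hjlt : j < i := by
        rcases Nat.lt_or_ge j i with h | h
        · exact h
        · exfalso; have : j = i := by omega
          subst this; omega
      have hjX : j < X.length := by omega
      have hjY : j < Y.length := by omega
      have hxj : PySem.List.pyGet? X (j : Int) = some X[j] := by
        rw [PySem.List.pyGet?_natCast, List.getElem?_eq_getElem hjX]
      have hyj : PySem.List.pyGet? Y (j : Int) = some Y[j] := by
        rw [PySem.List.pyGet?_natCast, List.getElem?_eq_getElem hjY]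
      have hpref : pref X Y (j + 1) = pref X Y j + |X[j] - Y[j]| := by
        simp [pref, List.getD_eq_getElem?_getD, List.getElem?_eq_getElem hjX, List.getElem?_eq_getElem hjY]
      have hstepA : solveWhileA (solveCount X Y N) K (pref X Y i) j
          = solveWhileA (solveCount X Y N) K (pref X Y i) (j + 1) := by
        rw [whileA_step _ _ _ _ _ (count_spec X Y N h0 j (by omega)), if_pos hgt]
      have hstepB : solveWhileB X Y K (pref X Y i - pref X Y j) j
          = solveWhileB X Y K (pref X Y i - pref X Y (j + 1)) (j + 1) := by
        rw [whileB_step X Y K _ j X[j] Y[j] hxj hyj, if_pos hgt]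
        congr 1
        rw [hpref]; ring
      rw [hstepA, hstepB]
      obtain ⟨h1, h2, h3⟩ := ih (j + 1) (by omega) (by omega)
      exact ⟨le_trans (Nat.le_succ j) h1, h2, h3⟩
    · have hA : solveWhileA (solveCount X Y N) K (pref X Y i) j = j := by
        rw [whileA_step _ _ _ _ _ (count_spec X Y N h0 j (by omega)), if_neg hgt]
      refine ⟨le_of_eq hA.symm, by omega, ?_⟩
      rw [hA, whileB_stop X Y K _ j hgt]

theorem count_getD (X Y : List Int) (N : Int) (h0 : 0 ≤ N) (k : Nat) (hk : (k : Int) ≤ N) :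
    PySem.List.pyGetD (solveCount X Y N) (k : Int) 0 = pref X Y k := by
  have h := count_spec X Y N h0 k hk
  rw [PySem.List.pyGet?_natCast] at h
  rw [PySem.List.pyGetD_natCast, List.getD_eq_getElem?_getD, h]
  rfl

theorem main_loop (X Y : List Int) (N K : Int) (hK : 0 ≤ K) (h0 : 0 ≤ N)
    (hNX : N ≤ X.length) (hNY : N ≤ Y.length) (n : Nat) (hn : (n : Int) ≤ N) :
    ((PySem.List.pyRange 1 ((n : Int) + 1) 1).foldl
      (fun (s : Nat × Int) i =>
        let j := solveWhileA (solveCount X Y N) K (PySem.List.pyGetD (solveCount X Y N) i 0) s.1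
        (j, max s.2 (i - (j : Int)))) (0, 0)).1 =
    ((PySem.List.pyRange 0 (n : Int) 1).foldl
      (fun (s : Int × Int × Nat) i =>
        let cur := s.2.1 + |PySem.List.pyGetD X i 0 - PySem.List.pyGetD Y i 0|
        let p := solveWhileB X Y K cur s.2.2
        (max s.1 (i - (p.2 : Int) + 1), p.1, p.2)) (0, 0, 0)).2.2 ∧
    ((PySem.List.pyRange 1 ((n : Int) + 1) 1).foldl
      (fun (s : Nat × Int) i =>
        let j := solveWhileA (solveCount X Y N) K (PySem.List.pyGetD (solveCount X Y N) i 0) s.1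
        (j, max s.2 (i - (j : Int)))) (0, 0)).2 =
    ((PySem.List.pyRange 0 (n : Int) 1).foldl
      (fun (s : Int × Int × Nat) i =>
        let cur := s.2.1 + |PySem.List.pyGetD X i 0 - PySem.List.pyGetD Y i 0|
        let p := solveWhileB X Y K cur s.2.2
        (max s.1 (i - (p.2 : Int) + 1), p.1, p.2)) (0, 0, 0)).1 ∧
    ((PySem.List.pyRange 0 (n : Int) 1).foldl
      (fun (s : Int × Int × Nat) i =>
        let cur := s.2.1 + |PySem.List.pyGetD X i 0 - PySem.List.pyGetD Y i 0|
        let p := solveWhileB X Y K cur s.2.2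
        (max s.1 (i - (p.2 : Int) + 1), p.1, p.2)) (0, 0, 0)).2.1 =
      pref X Y n - pref X Y
        (((PySem.List.pyRange 1 ((n : Int) + 1) 1).foldl
          (fun (s : Nat × Int) i =>
            let j := solveWhileA (solveCount X Y N) K (PySem.List.pyGetD (solveCount X Y N) i 0) s.1
            (j, max s.2 (i - (j : Int)))) (0, 0)).1) ∧
    ((PySem.List.pyRange 1 ((n : Int) + 1) 1).foldl
      (fun (s : Nat × Int) i =>
        let j := solveWhileA (solveCount X Y N) K (PySem.List.pyGetD (solveCount X Y N) i 0) s.1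
        (j, max s.2 (i - (j : Int)))) (0, 0)).1 ≤ n := by
  induction n with
  | zero =>
    simp [PySem.List.pyRange_one_eq_nil (le_refl (1 : Int)), PySem.List.pyRange_one_eq_nil (le_refl (0 : Int)), pref]
  | succ n ih =>
    obtain ⟨e1, e2, e3, e4⟩ := ih (by push_cast at hn ⊢; omega)
    have hsplitA : PySem.List.pyRange 1 ((↑(n + 1) : Int) + 1) 1
        = PySem.List.pyRange 1 ((n : Int) + 1) 1 ++ [(n : Int) + 1] := by
      push_cast
      exact PySem.List.pyRange_one_succ_right (by omega)
    have hsplitB : PySem.List.pyRange 0 (↑(n + 1) : Int) 1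
        = PySem.List.pyRange 0 (n : Int) 1 ++ [(n : Int)] := by
      push_cast
      exact PySem.List.pyRange_one_succ_right (by omega)
    rw [hsplitA, hsplitB, List.foldl_append, List.foldl_append]
    set aS := (PySem.List.pyRange 1 ((n : Int) + 1) 1).foldl
      (fun (s : Nat × Int) i =>
        let j := solveWhileA (solveCount X Y N) K (PySem.List.pyGetD (solveCount X Y N) i 0) s.1
        (j, max s.2 (i - (j : Int)))) (0, 0) with haS
    set bS := (PySem.List.pyRange 0 (n : Int) 1).foldl
      (fun (s : Int × Int × Nat) i =>
        let cur := s.2.1 + |PySem.List.pyGetD X i 0 - PySem.List.pyGetD Y i 0|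
        let p := solveWhileB X Y K cur s.2.2
        (max s.1 (i - (p.2 : Int) + 1), p.1, p.2)) (0, 0, 0) with hbS
    simp only [List.foldl_cons, List.foldl_nil]
    have hci : PySem.List.pyGetD (solveCount X Y N) ((n : Int) + 1) 0 = pref X Y (n + 1) := by
      have : ((n : Int) + 1) = ((n + 1 : Nat) : Int) := by push_cast; ring
      rw [this, count_getD X Y N h0 (n + 1) (by push_cast at hn ⊢; omega)]
    have hcur : bS.2.1 + |PySem.List.pyGetD X (n : Int) 0 - PySem.List.pyGetD Y (n : Int) 0|
        = pref X Y (n + 1) - pref X Y aS.1 := by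
      rw [e3, PySem.List.pyGetD_natCast, PySem.List.pyGetD_natCast]
      simp [pref]
      ring
    obtain ⟨h1, h2, h3⟩ := while_eq X Y N K hK h0 hNX hNY (n + 1) aS.1 (by omega)
      (by push_cast at hn ⊢; omega)
    simp only [hci, hcur, ← e1, h3]
    refine ⟨trivial, ?_, trivial, h2⟩
    rw [e2]
    congr 1
    ring

-- ===== VERDICT (by name: the statement is the Claim_ definition above) =====
theorem solve_spec : Claim_equal_solve := by
  intro X Y N K _ hPre
  obtain ⟨h0, hNX, hNY, hKor⟩ := hPre
  unfold Spec_solve solve solve_alt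
  rcases hKor with hK | hN0
  · have hN : ((N.toNat : Nat) : Int) = N := Int.toNat_of_nonneg h0
    have hr1 : PySem.List.pyRange 1 (N + 1) 1 = PySem.List.pyRange 1 ((N.toNat : Int) + 1) 1 := by
      rw [hN]
    have hr0 : PySem.List.pyRange 0 N 1 = PySem.List.pyRange 0 (N.toNat : Int) 1 := by
      rw [hN]
    rw [hr1, hr0]
    exact (main_loop X Y N K hK h0 hNX hNY N.toNat (by omega)).2.1
  · subst hN0
    norm_num [PySem.List.pyRange_one_eq_nil (le_refl (1 : Int)),
      PySem.List.pyRange_one_eq_nil (le_refl (0 : Int))]
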